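-- pv_equiv track=rewrite | github.com/pulakshk/book-research-tool | execution/websearch_email_discovery.py | _pick_best_email
-- ===== SOURCE A (Python) =====
-- _BAD_EMAILS = {
--     "user@domain.com", "email@example.com", "noreply@google.com",
--     "support@goodreads.com", "noreply@goodreads.com",
-- }
--
-- _BAD_DOMAINS = {
--     "example.com", "domain.com", "email.com", "test.com", "sentry.io",
--     "wixpress.com", "squarespace.com", "wordpress.com", "google.com",
--     "goodreads.com", "amazon.com", "facebook.com", "twitter.com",
-- }
--
-- def _valid_email(e):
--     e = e.strip().lower()
--     if not e or "@" not in e or e in _BAD_EMAILS: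
--         return False
--     return e.split("@")[-1] not in _BAD_DOMAINS
--
-- def _pick_best_email(emails, author=""):
--     valid = [e for e in emails if _valid_email(e)]
--     if not valid:
--         return ""
--     parts = [p.lower() for p in author.split() if len(p) > 2]
--     # Prefer emails containing author name parts
--     for e in valid:
--         local = e.split("@")[0].lower().replace(".", "").replace("_", "").replace("-", "")
--         if any(p in local for p in parts):
--             return e
--     # Deprioritize publicity/generic emails
--     generic_prefixes = {"publicity", "admin", "press", "media", "info", "contact",
--                         "hello", "office", "support", "newsletter", "noreply"}
--     personal = [e for e in valid if e.split("@")[0].lower() not in generic_prefixes]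
--     return personal[0] if personal else valid[0]
-- ===== SOURCE B (Python) =====
-- _BAD_EMAILS = {
--     "user@domain.com", "email@example.com", "noreply@google.com",
--     "support@goodreads.com", "noreply@goodreads.com",
-- }
--
-- _BAD_DOMAINS = {
--     "example.com", "domain.com", "email.com", "test.com", "sentry.io",
--     "wixpress.com", "squarespace.com", "wordpress.com", "google.com",
--     "goodreads.com", "amazon.com", "facebook.com", "twitter.com",
-- }
--
-- _GENERIC = {"publicity", "admin", "press", "media", "info", "contact",
--             "hello", "office", "support", "newsletter", "noreply"}
--
--
-- def _pick_best_email(emails, author=""):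
--     # single pass: return the first author-match immediately, otherwise keep the
--     # best-ranked valid email seen so far (1 = personal, 2 = generic prefix)
--     parts = [p.lower() for p in author.split() if len(p) > 2]
--     best, best_rank = "", 3
--     for e in emails:
--         s = e.strip().lower()
--         if (not s or "@" not in s or s in _BAD_EMAILS
--                 or s.split("@")[-1] in _BAD_DOMAINS):
--             continue
--         prefix = e.partition("@")[0].lower()
--         if any(p in "".join(c for c in prefix if c not in "._-") for p in parts):
--             return e
--         rank = 2 if prefix in _GENERIC else 1
--         if rank < best_rank:
--             best, best_rank = e, rank
--     return best
-- ===== Notes on version B (the rewrite author's own statement) =====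
-- stated objective: simpler
-- what changed: A's staged passes (materialise the valid list, scan it for an author-name match, filter out generic prefixes, then index the leftovers) are replaced by one pass over the raw input that validates each email inline, returns an author match immediately and otherwise keeps a best-so-far (email, rank) accumulator.
import Mathlib
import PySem

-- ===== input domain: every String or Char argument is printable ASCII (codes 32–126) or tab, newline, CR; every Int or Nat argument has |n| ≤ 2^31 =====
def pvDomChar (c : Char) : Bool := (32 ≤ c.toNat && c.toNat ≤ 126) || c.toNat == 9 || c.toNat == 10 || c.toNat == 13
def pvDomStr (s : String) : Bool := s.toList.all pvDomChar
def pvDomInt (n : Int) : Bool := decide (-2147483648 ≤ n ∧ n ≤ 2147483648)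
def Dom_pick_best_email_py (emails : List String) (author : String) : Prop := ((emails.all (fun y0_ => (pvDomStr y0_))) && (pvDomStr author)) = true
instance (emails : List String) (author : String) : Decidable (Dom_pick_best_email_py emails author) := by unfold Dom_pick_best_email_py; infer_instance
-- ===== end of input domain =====

-- B replaces A's staged passes (build the valid list, scan it for an author
-- match, then filter out generic prefixes, then index) by one pass over the raw
-- input that validates each email inline, returns an author match at once and
-- otherwise keeps the best-ranked email seen so far; objective: simpler
-- (same asymptotic cost).

-- ===== PORT A =====
def pvBadEmails : PySem.Set String := PySem.Set.ofList
  ["user@domain.com", "email@example.com", "noreply@google.com",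
   "support@goodreads.com", "noreply@goodreads.com"]

def pvBadDomains : PySem.Set String := PySem.Set.ofList
  ["example.com", "domain.com", "email.com", "test.com", "sentry.io",
   "wixpress.com", "squarespace.com", "wordpress.com", "google.com",
   "goodreads.com", "amazon.com", "facebook.com", "twitter.com"]

def pvGenericPrefixes : PySem.Set String := PySem.Set.ofList
  ["publicity", "admin", "press", "media", "info", "contact",
   "hello", "office", "support", "newsletter", "noreply"]

-- _valid_email
def valid_email (e : String) : Bool :=
  let e := PySem.Str.lower (PySem.Str.strip e)
  if e = "" || !(PySem.Str.isIn "@" e) || PySem.Set.contains pvBadEmails e then false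
  else !(PySem.Set.contains pvBadDomains
          (PySem.List.pyGetD ((PySem.Str.split? e "@").getD []) (-1) ""))

-- e.split("@")[0].lower()
def emailPrefix (e : String) : String :=
  PySem.Str.lower (PySem.List.pyGetD ((PySem.Str.split? e "@").getD []) 0 "")

-- …prefix.replace(".","").replace("_","").replace("-","")
def emailLocal (e : String) : String :=
  PySem.Str.replace (PySem.Str.replace (PySem.Str.replace (emailPrefix e) "." "") "_" "") "-" ""

-- any(p in local for p in parts)
def matchesAuthor (parts : List String) (e : String) : Bool :=
  parts.any (fun p => PySem.Str.isIn p (emailLocal e))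

-- e.split("@")[0].lower() not in generic_prefixes
def isPersonal (e : String) : Bool :=
  !(PySem.Set.contains pvGenericPrefixes (emailPrefix e))

-- [p.lower() for p in author.split() if len(p) > 2]
def authorParts (author : String) : List String :=
  ((PySem.Str.split₀ author).filter (fun p => 2 < PySem.Str.len p)).map PySem.Str.lower

-- A's first loop: return the first valid email whose local part contains an author part
def scanA (parts : List String) : List String → Option String
  | [] => none
  | e :: t => if matchesAuthor parts e then some e else scanA parts t

def pick_best_email_py (emails : List String) (author : String) : String :=
  let valid := emails.filter valid_email
  if valid = [] then ""
  else
    let parts := authorParts author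
    match scanA parts valid with
    | some e => e
    | none =>
      let personal := valid.filter isPersonal
      match personal with
      | p :: _ => p
      | [] => PySem.List.pyGetD valid 0 ""

-- ===== PORT B =====
def bBadEmails : List String :=
  ["user@domain.com", "email@example.com", "noreply@google.com",
   "support@goodreads.com", "noreply@goodreads.com"]

def bBadDomains : List String :=
  ["example.com", "domain.com", "email.com", "test.com", "sentry.io",
   "wixpress.com", "squarespace.com", "wordpress.com", "google.com",
   "goodreads.com", "amazon.com", "facebook.com", "twitter.com"]

def bGeneric : List String :=
  ["publicity", "admin", "press", "media", "info", "contact",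
   "hello", "office", "support", "newsletter", "noreply"]

-- the inline validity test of B's loop body (s = e.strip().lower() precomputed)
def bOk (e : String) : Bool :=
  let s := PySem.Str.lower (PySem.Str.strip e)
  !(s == "") && PySem.Str.isIn "@" s && !(bBadEmails.contains s) &&
    !(bBadDomains.contains
        (PySem.List.pyGetD ((PySem.Str.split? s "@").getD []) (-1) ""))

-- e.partition("@")[0].lower()
def bPrefix (e : String) : String :=
  String.ofList (PySem.Chars.lower (e.toList.takeWhile (fun c => !(c == '@'))))

-- "".join(c for c in prefix if c not in "._-")
def bStripPunct (s : String) : String :=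
  String.ofList (s.toList.filter (fun c => !(c == '.' || c == '_' || c == '-')))

-- any(p in local for p in parts)
def bMatch (parts : List String) (localPart : String) : Bool :=
  parts.any (fun p => PySem.Str.isIn p localPart)

-- [p.lower() for p in author.split() if len(p) > 2]
def bParts (author : String) : List String :=
  (PySem.Str.split₀ author).flatMap
    (fun p => if 2 < PySem.Str.len p then [PySem.Str.lower p] else [])

-- the single pass: best / best_rank accumulator, early return on an author match
def bLoop (parts : List String) : List String → String → Nat → String
  | [], best, _ => best
  | e :: rest, best, bestRank =>
    if bOk e then
      let pfx := bPrefix e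
      if bMatch parts (bStripPunct pfx) then e
      else
        let rank : Nat := if bGeneric.contains pfx then 2 else 1
        if rank < bestRank then bLoop parts rest e rank
        else bLoop parts rest best bestRank
    else bLoop parts rest best bestRank

def pick_best_email_py_alt (emails : List String) (author : String) : String :=
  bLoop (bParts author) emails "" 3

-- ===== PRECONDITION & SPEC =====
def Spec_pick_best_email_py (emails : List String) (author : String) (out : String) : Prop := out = pick_best_email_py_alt emails author
instance (emails : List String) (author : String) (out : String) : Decidable (Spec_pick_best_email_py emails author out) := by unfold Spec_pick_best_email_py; infer_instance

-- ===== CLAIM (what is proved, stated in full; the proofs are below) =====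
def Claim_equal_pick_best_email_py : Prop := ∀ (emails : List String) (author : String), Dom_pick_best_email_py emails author → Spec_pick_best_email_py emails author (pick_best_email_py emails author)

-- ===== LEMMAS AND PROOFS =====

-- A's result, written as one selector over the filtered list
def selA (parts : List String) (l : List String) : String :=
  match l.find? (matchesAuthor parts) with
  | some e => e
  | none =>
    match l.filter isPersonal with
    | p :: _ => p
    | [] => l.headD ""

theorem scanA_eq_find? (parts : List String) (l : List String) :
    scanA parts l = l.find? (matchesAuthor parts) := by
  induction l with
  | nil => rfl
  | cons e t ih =>
    by_cases h : matchesAuthor parts e = true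
    · simp [scanA, List.find?, h]
    · simp only [Bool.not_eq_true] at h
      simp [scanA, List.find?, h, ih]

theorem portA_eq_selA (emails : List String) (author : String) :
    pick_best_email_py emails author
      = selA (authorParts author) (emails.filter valid_email) := by
  unfold pick_best_email_py selA
  cases hv : emails.filter valid_email with
  | nil => simp
  | cons e t =>
    simp only [reduceCtorEq, if_false]
    rw [scanA_eq_find?]
    cases hf : (e :: t).find? (matchesAuthor (authorParts author)) with
    | some x => simp
    | none =>
      cases hp : (e :: t).filter isPersonal with
      | nil => simp [PySem.List.pyGetD_zero_cons]
      | cons y ys => simp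

-- the PySem set constants of A's port, evaluated to the plain lists of B's port
theorem pvBadEmails_eq : (pvBadEmails : List String) = bBadEmails := by decide
theorem pvBadDomains_eq : (pvBadDomains : List String) = bBadDomains := by decide

-- two Strings with the same character list are equal
theorem pv_str_ext {s t : String} (h : s.toList = t.toList) : s = t := by
  have h2 := congrArg String.ofList h
  rwa [String.ofList_toList, String.ofList_toList] at h2

-- bridges between B's helpers and A's helpers
theorem bOk_eq_valid (e : String) : bOk e = valid_email e := by
  unfold bOk valid_email
  simp only [PySem.Set.contains, pvBadEmails_eq, pvBadDomains_eq]
  by_cases h1 : PySem.Str.lower (PySem.Str.strip e) = "" <;>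
  cases h2 : PySem.Str.isIn "@" (PySem.Str.lower (PySem.Str.strip e)) <;>
  cases h3 : bBadEmails.contains (PySem.Str.lower (PySem.Str.strip e)) <;>
  simp [h1, h2, h3]

-- Chars.splitOn with a one-character separator is List.splitOnP
theorem pv_splitOn_go (c : Char) (fuel : Nat) :
    ∀ (l cur : List Char) (acc : List (List Char)), l.length ≤ fuel →
    PySem.Chars.splitOn.go [c] fuel l cur acc
      = acc.reverse ++ (List.splitOnP (fun a => a == c) l).modifyHead (fun x => cur.reverse ++ x) := by
  induction fuel with
  | zero =>
    intro l cur acc h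
    have hl : l = [] := List.eq_nil_of_length_eq_zero (Nat.le_zero.mp h)
    subst hl
    simp [PySem.Chars.splitOn.go, List.splitOnP_nil]
  | succ n ih =>
    intro l cur acc h
    cases l with
    | nil => simp [PySem.Chars.splitOn.go, List.splitOnP_nil]
    | cons a t =>
      have ht : t.length ≤ n := by simpa using h
      rw [List.splitOnP_cons]
      by_cases hc : a = c
      · subst hc
        have hpre : List.isPrefixOf [a] (a :: t) = true := by simp [List.isPrefixOf]
        simp only [PySem.Chars.splitOn.go, hpre, if_true, List.length_cons, List.length_nil,
          List.drop_succ_cons, List.drop_zero, beq_self_eq_true]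
        rw [ih t [] _ ht]
        obtain ⟨y, ys, hys⟩ := List.exists_cons_of_ne_nil (List.splitOnP_ne_nil (fun x => x == a) t)
        simp [hys]
      · have hpre : List.isPrefixOf [c] (a :: t) = false := by
          simp [List.isPrefixOf]
          exact fun h => hc h.symm
        have hba : (a == c) = false := by simp [hc]
        simp only [PySem.Chars.splitOn.go, hpre, if_false, hba, Bool.false_eq_true]
        rw [ih t (a :: cur) acc ht]
        obtain ⟨y, ys, hys⟩ := List.exists_cons_of_ne_nil (List.splitOnP_ne_nil (fun a => a == c) t)
        simp [hys]

theorem pv_splitOn_single (c : Char) (s : List Char) :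
    PySem.Chars.splitOn s [c] = List.splitOnP (fun a => a == c) s := by
  unfold PySem.Chars.splitOn
  rw [pv_splitOn_go c (s.length + 1) s [] [] (by omega)]
  obtain ⟨y, ys, hys⟩ := List.exists_cons_of_ne_nil (List.splitOnP_ne_nil (fun a => a == c) s)
  simp [hys]

-- the first piece of splitOnP is the longest prefix avoiding the separator
theorem pv_splitOnP_head (p : Char → Bool) (l : List Char) :
    (List.splitOnP p l).headD [] = l.takeWhile (fun a => !(p a)) := by
  induction l with
  | nil => simp [List.splitOnP_nil]
  | cons a t ih =>
    rw [List.splitOnP_cons]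
    by_cases h : p a
    · simp [h]
    · obtain ⟨y, ys, hys⟩ := List.exists_cons_of_ne_nil (List.splitOnP_ne_nil p t)
      rw [hys] at ih ⊢
      simp only [List.headD_cons] at ih
      simp [h, ih]

theorem bPrefix_eq (e : String) : bPrefix e = emailPrefix e := by
  unfold bPrefix emailPrefix
  have hsep : ("@" : String).toList = ['@'] := by decide
  have hsplit : PySem.Str.split? e "@"
      = some (List.map String.ofList (List.splitOnP (fun a => a == '@') e.toList)) := by
    rw [PySem.Str.split?, hsep]
    simp [PySem.Chars.split?, pv_splitOn_single]
  rw [hsplit, Option.getD_some]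
  obtain ⟨y, ys, hys⟩ := List.exists_cons_of_ne_nil (List.splitOnP_ne_nil (fun a => a == '@') e.toList)
  have hhead : y = e.toList.takeWhile (fun a => !(a == '@')) := by
    have := pv_splitOnP_head (fun a => a == '@') e.toList
    rw [hys] at this
    simpa using this
  rw [hys]
  simp only [List.map_cons, PySem.List.pyGetD_zero_cons]
  rw [hhead]
  apply pv_str_ext
  simp [PySem.Str.toList_lower, String.toList_ofList]

-- Chars.replace of a one-character pattern by "" is a filter
theorem pv_replace_go (c : Char) (fuel : Nat) :
    ∀ (l acc : List Char), l.length ≤ fuel →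
    PySem.Chars.replace.go [c] [] fuel l acc
      = acc.reverse ++ l.filter (fun a => !(a == c)) := by
  induction fuel with
  | zero =>
    intro l acc h
    have hl : l = [] := List.eq_nil_of_length_eq_zero (Nat.le_zero.mp h)
    subst hl
    simp [PySem.Chars.replace.go]
  | succ n ih =>
    intro l acc h
    cases l with
    | nil => simp [PySem.Chars.replace.go]
    | cons a t =>
      have ht : t.length ≤ n := by simpa using h
      by_cases hc : a = c
      · subst hc
        have hpre : List.isPrefixOf [a] (a :: t) = true := by simp [List.isPrefixOf]
        simp only [PySem.Chars.replace.go, hpre, if_true, List.length_cons, List.length_nil,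
          List.drop_succ_cons, List.drop_zero, List.reverse_nil, List.nil_append]
        rw [ih t acc ht]
        simp
      · have hpre : List.isPrefixOf [c] (a :: t) = false := by
          simp [List.isPrefixOf]
          exact fun h => hc h.symm
        have hba : (a == c) = false := by simp [hc]
        simp only [PySem.Chars.replace.go, hpre, if_false, Bool.false_eq_true]
        rw [ih t (a :: acc) ht]
        simp [hba]

theorem pv_chars_replace (c : Char) (cs : List Char) :
    PySem.Chars.replace cs [c] [] = cs.filter (fun a => !(a == c)) := by
  unfold PySem.Chars.replace
  simp only [List.isEmpty_cons, Bool.false_eq_true, if_false]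
  rw [pv_replace_go c cs.length cs [] (Nat.le_refl _)]
  simp

theorem bStrip_eq (e : String) : bStripPunct (emailPrefix e) = emailLocal e := by
  unfold bStripPunct emailLocal
  apply pv_str_ext
  have hd : (("." : String)).toList = ['.'] := by decide
  have hu : (("_" : String)).toList = ['_'] := by decide
  have hh : (("-" : String)).toList = ['-'] := by decide
  have he : (("" : String)).toList = [] := by decide
  simp only [String.toList_ofList, PySem.Str.toList_replace, hd, hu, hh, he,
    pv_chars_replace, List.filter_filter]
  apply List.filter_congr
  intro a _
  cases h1 : a == '.' <;> cases h2 : a == '_' <;> cases h3 : a == '-' <;> simp [h1, h2, h3]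

theorem bMatch_eq (parts : List String) (e : String) :
    bMatch parts (bStripPunct (bPrefix e)) = matchesAuthor parts e := by
  rw [bPrefix_eq, bStrip_eq]; rfl

theorem bGeneric_eq (e : String) :
    bGeneric.contains (bPrefix e) = !(isPersonal e) := by
  rw [bPrefix_eq]
  simp [isPersonal, PySem.Set.contains, pvGenericPrefixes, bGeneric, PySem.Set.ofList]

theorem pv_flatMap_filter_map {α β : Type} (P : α → Prop) [DecidablePred P]
    (f : α → β) (l : List α) :
    l.flatMap (fun p => if P p then [f p] else [])
      = (l.filter (fun p => decide (P p))).map f := by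
  induction l with
  | nil => rfl
  | cons a t ih => by_cases h : P a <;> simp [h, ih]

theorem bParts_eq (author : String) : bParts author = authorParts author := by
  unfold bParts authorParts
  exact pv_flatMap_filter_map _ _ _

-- selA, written with option/list defaults instead of matches
theorem selA_getD (parts : List String) (l : List String) :
    selA parts l
      = (l.find? (matchesAuthor parts)).getD ((l.filter isPersonal).headD (l.headD "")) := by
  unfold selA
  cases h : l.find? (matchesAuthor parts) with
  | some x => simp
  | none => cases hp : l.filter isPersonal with
    | nil => simp
    | cons y ys => simp

-- loop invariant: the accumulator holds a rank-1 element
theorem bLoop_one (parts : List String) (l : List String) (m : String) :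
    bLoop parts l m 1 = ((l.filter valid_email).find? (matchesAuthor parts)).getD m := by
  induction l generalizing m with
  | nil => simp [bLoop]
  | cons e t ih =>
    by_cases hok : bOk e = true
    · have hv : valid_email e = true := by rw [← bOk_eq_valid]; exact hok
      by_cases hM : matchesAuthor parts e = true
      · simp [bLoop, hok, bMatch_eq, hM, List.filter_cons, hv]
      · have hM' : matchesAuthor parts e = false := by simpa using hM
        cases hP : isPersonal e <;>
          [(have hmem : bPrefix e ∈ bGeneric := by
              have hg : bGeneric.contains (bPrefix e) = true := by rw [bGeneric_eq, hP]; rfl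
              simpa using hg);
           (have hmem : bPrefix e ∉ bGeneric := by
              have hg : bGeneric.contains (bPrefix e) = false := by rw [bGeneric_eq, hP]; rfl
              simpa using hg)] <;>
          simp [bLoop, hok, bMatch_eq, hM', List.filter_cons, hv, hmem, ih]
    · have hv : valid_email e = false := by rw [← bOk_eq_valid]; simpa using hok
      simp [bLoop, hok, List.filter_cons, hv, ih]

-- loop invariant: the accumulator holds a rank-2 element
theorem bLoop_two (parts : List String) (l : List String) (m : String) :
    bLoop parts l m 2
      = ((l.filter valid_email).find? (matchesAuthor parts)).getD
          (((l.filter valid_email).filter isPersonal).headD m) := by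
  induction l generalizing m with
  | nil => simp [bLoop]
  | cons e t ih =>
    by_cases hok : bOk e = true
    · have hv : valid_email e = true := by rw [← bOk_eq_valid]; exact hok
      by_cases hM : matchesAuthor parts e = true
      · simp [bLoop, hok, bMatch_eq, hM, List.filter_cons, hv]
      · have hM' : matchesAuthor parts e = false := by simpa using hM
        cases hP : isPersonal e
        · have hmem : bPrefix e ∈ bGeneric := by
            have hg : bGeneric.contains (bPrefix e) = true := by rw [bGeneric_eq, hP]; rfl
            simpa using hg
          simp [bLoop, hok, bMatch_eq, hM', List.filter_cons, hv, hmem, hP, ih]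
        · have hmem : bPrefix e ∉ bGeneric := by
            have hg : bGeneric.contains (bPrefix e) = false := by rw [bGeneric_eq, hP]; rfl
            simpa using hg
          simp [bLoop, hok, bMatch_eq, hM', List.filter_cons, hv, hmem, hP, bLoop_one]
    · have hv : valid_email e = false := by rw [← bOk_eq_valid]; simpa using hok
      simp [bLoop, hok, List.filter_cons, hv, ih]

-- the whole pass equals A's staged selection over the filtered list
theorem bLoop_top (parts : List String) (l : List String) :
    bLoop parts l "" 3 = selA parts (l.filter valid_email) := by
  induction l with
  | nil => simp [bLoop, selA]
  | cons e t ih =>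
    by_cases hok : bOk e = true
    · have hv : valid_email e = true := by rw [← bOk_eq_valid]; exact hok
      by_cases hM : matchesAuthor parts e = true
      · simp [bLoop, hok, bMatch_eq, hM, List.filter_cons, hv, selA_getD]
      · have hM' : matchesAuthor parts e = false := by simpa using hM
        cases hP : isPersonal e
        · have hmem : bPrefix e ∈ bGeneric := by
            have hg : bGeneric.contains (bPrefix e) = true := by rw [bGeneric_eq, hP]; rfl
            simpa using hg
          simp [bLoop, hok, bMatch_eq, hM', List.filter_cons, hv, hmem, hP,
            bLoop_two, selA_getD]
        · have hmem : bPrefix e ∉ bGeneric := by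
            have hg : bGeneric.contains (bPrefix e) = false := by rw [bGeneric_eq, hP]; rfl
            simpa using hg
          simp [bLoop, hok, bMatch_eq, hM', List.filter_cons, hv, hmem, hP,
            bLoop_one, selA_getD]
    · have hv : valid_email e = false := by rw [← bOk_eq_valid]; simpa using hok
      simp [bLoop, hok, List.filter_cons, hv, ih]

-- ===== VERDICT (by name: the statement is the Claim_ definition above) =====
theorem pick_best_email_py_spec : Claim_equal_pick_best_email_py := by
  intro emails author _
  unfold Spec_pick_best_email_py pick_best_email_py_alt
  rw [portA_eq_selA, bParts_eq, bLoop_top]
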